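-- pv_equiv track=rewrite | github.com/flpnascto/restaurant-orders | src/analyze_log.py | get_order_never_asked_by_customer
-- ===== SOURCE A (Python) =====
-- def get_order_never_asked_by_customer(log, customer):
--     orders_type = set()
--     customer_orders = set()
--     for item in log:
--         orders_type.add(item["order"])
--         if item["customer"] == customer:
--             customer_orders.add(item["order"])
--     return orders_type.difference(customer_orders)
-- ===== SOURCE B (Python) =====
-- def get_order_never_asked_by_customer(log, customer):
--     who_ordered = {}
--     for item in log:
--         who_ordered.setdefault(item["order"], set()).add(item["customer"])
--     return {order for order, customers in who_ordered.items() if customer not in customers}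
-- ===== Notes on version B (the rewrite author's own statement) =====
-- stated objective: alternative
-- what changed: Replaces A's two parallel sets plus a final set-difference with a one-pass order->customers index (dict of sets via setdefault) followed by a filtering set comprehension over its items.
import Mathlib
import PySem

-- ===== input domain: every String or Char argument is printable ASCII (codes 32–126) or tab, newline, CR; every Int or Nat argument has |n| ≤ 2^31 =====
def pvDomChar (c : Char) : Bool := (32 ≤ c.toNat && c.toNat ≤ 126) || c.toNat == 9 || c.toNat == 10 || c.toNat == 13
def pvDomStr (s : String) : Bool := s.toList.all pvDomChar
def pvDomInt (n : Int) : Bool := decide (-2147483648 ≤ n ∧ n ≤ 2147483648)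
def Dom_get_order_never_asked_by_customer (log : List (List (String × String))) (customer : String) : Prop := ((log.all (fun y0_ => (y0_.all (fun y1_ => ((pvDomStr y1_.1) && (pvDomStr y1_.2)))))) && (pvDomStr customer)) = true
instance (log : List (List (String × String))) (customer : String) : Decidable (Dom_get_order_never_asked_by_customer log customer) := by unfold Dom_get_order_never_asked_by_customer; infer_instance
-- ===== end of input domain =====

-- B replaces A's two parallel sets plus set-difference with a one-pass order→customers
-- index (dict of sets) followed by a filtering pass over its items (objective: alternative).
-- Shared lookup helper: item[k] on a Python dict given as an association list (first match);
-- Pre_ guarantees the key is present, so the "" default is never reached on admitted inputs.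

-- ===== PORT A =====
def pvLookup (item : List (String × String)) (k : String) : String :=
  ((PySem.Dict.mk item).get? k).getD ""

def pvOrd (item : List (String × String)) : String := pvLookup item "order"
def pvCust (item : List (String × String)) : String := pvLookup item "customer"

-- loop body of A: add to orders_type, conditionally to customer_orders
def pvStepA (customer : String) (acc : PySem.Set String × PySem.Set String)
    (item : List (String × String)) : PySem.Set String × PySem.Set String :=
  (PySem.Set.add acc.1 (pvOrd item),
   if pvCust item == customer then PySem.Set.add acc.2 (pvOrd item) else acc.2)

def get_order_never_asked_by_customer (log : List (List (String × String))) (customer : String) : List String :=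
  PySem.Set.diff (log.foldl (pvStepA customer) (PySem.Set.empty, PySem.Set.empty)).1
    (log.foldl (pvStepA customer) (PySem.Set.empty, PySem.Set.empty)).2

-- ===== PORT B =====
-- loop body of B: who_ordered.setdefault(item["order"], set()).add(item["customer"])
def pvStepB (d : PySem.Dict String (PySem.Set String)) (item : List (String × String)) :
    PySem.Dict String (PySem.Set String) :=
  PySem.Dict.modify d (pvOrd item) PySem.Set.empty (fun s => PySem.Set.add s (pvCust item))

def get_order_never_asked_by_customer_alt (log : List (List (String × String))) (customer : String) : List String :=
  PySem.Set.ofList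
    (((log.foldl pvStepB PySem.Dict.empty).items.filter
        (fun p => !(PySem.Set.contains p.2 customer))).map Prod.fst)

-- ===== PRECONDITION & SPEC =====
-- Pre_ excludes exactly the inputs on which the Python A raises KeyError:
-- some item lacks the "order" or the "customer" key.
def Pre_get_order_never_asked_by_customer (log : List (List (String × String))) (customer : String) : Prop :=
  ∀ item ∈ log, "order" ∈ item.map Prod.fst ∧ "customer" ∈ item.map Prod.fst
instance (log : List (List (String × String))) (customer : String) : Decidable (Pre_get_order_never_asked_by_customer log customer) := by unfold Pre_get_order_never_asked_by_customer; infer_instance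

def pvWitness_get_order_never_asked_by_customer : (List (List (String × String))) × String :=
  ([[("order", "pizza"), ("customer", "maria")], [("order", "soda"), ("customer", "jose")]], "jose")

def Spec_get_order_never_asked_by_customer (log : List (List (String × String))) (customer : String) (out : List String) : Prop := out = get_order_never_asked_by_customer_alt log customer
instance (log : List (List (String × String))) (customer : String) (out : List String) : Decidable (Spec_get_order_never_asked_by_customer log customer out) := by unfold Spec_get_order_never_asked_by_customer; infer_instance

-- ===== CLAIM (what is proved, stated in full; the proofs are below) =====
def Claim_equal_get_order_never_asked_by_customer : Prop := ∀ (log : List (List (String × String))) (customer : String), Dom_get_order_never_asked_by_customer log customer → Pre_get_order_never_asked_by_customer log customer → Spec_get_order_never_asked_by_customer log customer (get_order_never_asked_by_customer log customer)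

-- ===== LEMMAS AND PROOFS =====

-- Joint loop invariant: A's orders_type is B's key list, B's keys stay Nodup, and
-- membership in A's customer_orders is "customer ∈ the key's customer set in B's index".
lemma pv_inv (customer : String) (log : List (List (String × String)))
    (s1 s2 : PySem.Set String) (d : PySem.Dict String (PySem.Set String))
    (h1 : s1 = d.keys) (hnd : d.keys.Nodup)
    (h2 : ∀ o : String, o ∈ s2 ↔ PySem.Set.contains (d.getD o PySem.Set.empty) customer = true) :
    (log.foldl (pvStepA customer) (s1, s2)).1 = (log.foldl pvStepB d).keys ∧
    (log.foldl pvStepB d).keys.Nodup ∧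
    (∀ o : String, o ∈ (log.foldl (pvStepA customer) (s1, s2)).2 ↔
      PySem.Set.contains ((log.foldl pvStepB d).getD o PySem.Set.empty) customer = true) := by
  induction log generalizing s1 s2 d with
  | nil => exact ⟨h1, hnd, h2⟩
  | cons item rest ih =>
    simp only [List.foldl_cons]
    apply ih
    · -- new s1 = new keys
      show PySem.Set.add s1 (pvOrd item) = (pvStepB d item).keys
      rw [pvStepB, PySem.Dict.keys_modify]
      by_cases hc : d.contains (pvOrd item) = true
      · rw [PySem.Dict.keys_insert_of_contains _ _ hc,
          PySem.Set.add_of_mem (by rw [h1, ← PySem.Dict.contains_iff_mem_keys]; exact hc)]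
        exact h1
      · rw [PySem.Dict.keys_insert_of_not_contains _ _ (by simpa using hc),
          PySem.Set.add_of_not_mem (by rw [h1, ← PySem.Dict.contains_iff_mem_keys]; simpa using hc), h1]
    · -- keys stay Nodup
      rw [pvStepB, PySem.Dict.keys_modify]
      by_cases hc : d.contains (pvOrd item) = true
      · rwa [PySem.Dict.keys_insert_of_contains _ _ hc]
      · rw [PySem.Dict.keys_insert_of_not_contains _ _ (by simpa using hc)]
        exact List.Nodup.append hnd (List.nodup_singleton _)
          (by simpa [← PySem.Dict.contains_iff_mem_keys] using hc)
    · -- customer_orders invariant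
      intro o
      show o ∈ (if pvCust item == customer then PySem.Set.add s2 (pvOrd item) else s2) ↔ _
      rw [pvStepB, PySem.Dict.getD_modify]
      by_cases ho : o = pvOrd item
      · subst ho
        by_cases hcc : pvCust item = customer
        · simp [hcc, PySem.Set.mem_add]
        · rw [if_neg (by simpa using hcc), h2 (pvOrd item)]
          simp only [if_true, PySem.Set.contains_iff, PySem.Set.mem_add]
          exact ⟨fun h => Or.inl h, fun h => h.elim id (fun h => absurd h.symm hcc)⟩
      · rw [if_neg ho]
        by_cases hcc : pvCust item = customer
        · rw [if_pos (by simpa using hcc)]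
          rw [PySem.Set.mem_add]
          simp [h2 o, ho]
        · rw [if_neg (by simpa using hcc)]
          exact h2 o

-- ===== VERDICT (by name: the statement is the Claim_ definition above) =====
theorem get_order_never_asked_by_customer_spec : Claim_equal_get_order_never_asked_by_customer := by
  intro log customer _ _
  show _ = _
  unfold get_order_never_asked_by_customer get_order_never_asked_by_customer_alt
  obtain ⟨h1, hnd, h2⟩ := pv_inv customer log PySem.Set.empty PySem.Set.empty PySem.Dict.empty
    rfl PySem.Dict.nodup_keys_empty (by simp [PySem.Dict.getD_empty, PySem.Set.empty])
  set p := log.foldl (pvStepA customer) (PySem.Set.empty, PySem.Set.empty) with hp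
  set dB := log.foldl pvStepB PySem.Dict.empty with hd
  -- B's items are keys paired with their sets
  rw [PySem.Dict.items_eq_map_keys dB hnd PySem.Set.empty]
  rw [List.filter_map, List.map_map]
  have hmapid : (Prod.fst ∘ fun k => (k, dB.getD k PySem.Set.empty)) = id := rfl
  rw [hmapid, List.map_id]
  -- the filtered key list is Nodup, so ofList is the identity
  have hofl : PySem.Set.ofList (List.filter ((fun p => !(PySem.Set.contains p.2 customer)) ∘
        fun k => (k, dB.getD k PySem.Set.empty)) dB.keys) =
      List.filter ((fun p => !(PySem.Set.contains p.2 customer)) ∘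
        fun k => (k, dB.getD k PySem.Set.empty)) dB.keys :=
    PySem.Set.ofList_eq_self_of_nodup _ (List.Nodup.filter _ hnd)
  rw [hofl]
  -- A's diff is a filter over the same key list with the pointwise-equal predicate
  show p.1.filter (fun x => !(PySem.Set.contains p.2 x)) = _
  rw [h1]
  apply List.filter_congr
  intro k hk
  simp only [Function.comp_apply]
  congr 1
  exact Bool.coe_iff_coe.mp ((PySem.Set.contains_iff _ _).trans (h2 k))
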